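-- pv_equiv track=rewrite | github.com/nraistrick/algorithms | algorithms.py | has_palindromic_permutation
-- ===== SOURCE A (Python) =====
-- from collections import Counter
--
-- def has_palindromic_permutation(text):
--     """
--     Checks if a provided string has a permutation which is a palindrome.
--
--     * This implementation's runtime is O(n)
--     * Its space complexity is O(n)
--
--     :param str text: The input string
--     :rtype: bool
--     """
--     # Ignore any spaces that are part of the string
--     text = text.replace(" ", "")
--
--     # Get character counts for every letter in the string
--     character_counts = Counter(text)
--
--     # For an even length string, every character must be in a pair.
--     # For an uneven length string, we can only have one single character
--     # which is not part of a pair.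
--     single_character_allowed = (len(text) % 2 != 0)
--
--     for v in character_counts.values():
--         uneven_count = (v % 2 != 0)
--
--         if uneven_count and single_character_allowed:
--             single_character_allowed = False
--
--         elif uneven_count:
--             return False
--
--     return True
-- ===== SOURCE B (Python) =====
-- def has_palindromic_permutation(text):
--     """
--     Checks if a provided string has a permutation which is a palindrome.
--
--     Single parity pass: keep the set of characters seen an odd number of
--     times; a palindromic permutation exists iff at most one remains.
--
--     :param str text: The input string
--     :rtype: bool
--     """
--     odd = set()
--     for c in text.replace(" ", ""):
--         if c in odd:
--             odd.discard(c)
--         else: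
--             odd.add(c)
--     return len(odd) <= 1
-- ===== Notes on version B (the rewrite author's own statement) =====
-- stated objective: simpler
-- what changed: Replaced the Counter build plus the odd-count scan with a length-parity flag by a single parity-toggle pass over the characters maintaining the set of odd-count characters, returning len(set) <= 1.
import Mathlib
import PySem

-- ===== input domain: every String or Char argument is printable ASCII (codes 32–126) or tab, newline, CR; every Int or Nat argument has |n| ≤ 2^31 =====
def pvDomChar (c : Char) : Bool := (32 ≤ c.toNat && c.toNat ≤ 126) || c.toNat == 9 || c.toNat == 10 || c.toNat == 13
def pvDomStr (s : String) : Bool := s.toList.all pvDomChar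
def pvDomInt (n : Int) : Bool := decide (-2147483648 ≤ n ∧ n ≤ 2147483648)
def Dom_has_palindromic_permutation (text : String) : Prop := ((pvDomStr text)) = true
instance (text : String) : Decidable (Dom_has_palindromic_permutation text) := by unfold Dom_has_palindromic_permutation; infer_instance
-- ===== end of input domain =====

-- B replaces A's Counter build plus odd-count scan (with a length-parity flag) by a single
-- parity-toggle pass maintaining the set of odd-count characters; objective: simpler.


-- ===== PORT A =====
-- the 'for v in character_counts.values()' loop carrying the single_character_allowed flag
-- (the local 'uneven_count = (v % 2 != 0)' is inlined into the two tests that read it)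
def hppLoop (vals : List Int) (single_character_allowed : Bool) : Bool :=
  match vals with
  | [] => true
  | v :: rest =>
    if (PySem.Int.mod v 2 != 0) && single_character_allowed then hppLoop rest false
    else if (PySem.Int.mod v 2 != 0) then false
    else hppLoop rest single_character_allowed

def has_palindromic_permutation (text : String) : Bool :=
  let text' := PySem.Str.replace text " " ""
  let character_counts := PySem.Dict.counter text'.toList
  let single_character_allowed := PySem.Int.mod (PySem.Str.len text') 2 != 0
  hppLoop character_counts.values single_character_allowed

-- ===== PORT B =====
def has_palindromic_permutation_alt (text : String) : Bool :=
  let odd : PySem.Set Char :=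
    (PySem.Str.replace text " " "").toList.foldl
      (fun s c =>
        if PySem.Set.contains s c then PySem.Set.discard s c else PySem.Set.add s c)
      PySem.Set.empty
  decide (PySem.Set.len odd ≤ 1)

-- ===== PRECONDITION & SPEC =====
def Spec_has_palindromic_permutation (text : String) (out : Bool) : Prop := out = has_palindromic_permutation_alt text
instance (text : String) (out : Bool) : Decidable (Spec_has_palindromic_permutation text out) := by unfold Spec_has_palindromic_permutation; infer_instance

-- ===== CLAIM (what is proved, stated in full; the proofs are below) =====
def Claim_equal_has_palindromic_permutation : Prop := ∀ (text : String), Dom_has_palindromic_permutation text → Spec_has_palindromic_permutation text (has_palindromic_permutation text)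

-- ===== LEMMAS AND PROOFS =====

-- B's toggle step, named for the proofs
def hppToggle (s : PySem.Set Char) (c : Char) : PySem.Set Char :=
  if PySem.Set.contains s c then PySem.Set.discard s c else PySem.Set.add s c

-- Python's v % 2 on a nonnegative value is Nat's % 2
theorem fmod_two_natCast (n : Nat) : PySem.Int.mod (↑n) 2 = ↑(n % 2) := by
  show Int.fmod (↑n) 2 = ↑(n % 2)
  rw [Int.fmod_eq_emod]; simp

theorem fmod_two_bne (n : Nat) : ((PySem.Int.mod (↑n) 2) != 0) = decide (n % 2 = 1) := by
  rw [fmod_two_natCast]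
  rcases Nat.mod_two_eq_zero_or_one n with h | h <;> simp [h]

-- A's loop returns true iff the number of odd values fits in the allowance
theorem hppLoop_eq (vals : List Int) (allowed : Bool) :
    hppLoop vals allowed
      = decide (vals.countP (fun v => PySem.Int.mod v 2 != 0) ≤ if allowed then 1 else 0) := by
  induction vals generalizing allowed with
  | nil => simp [hppLoop]
  | cons v rest ih =>
    rw [hppLoop, List.countP_cons]
    by_cases hv : (PySem.Int.mod v 2 != 0) = true
    · rw [hv]
      cases allowed with
      | true =>
        simp only [Bool.and_self, if_true]
        rw [ih]
        simp only [Bool.false_eq_true, if_false]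
        rw [decide_eq_decide]
        omega
      | false =>
        simp only [Bool.and_false, Bool.false_eq_true, if_false, if_true]
        rw [eq_comm, decide_eq_false_iff_not]
        omega
    · rw [Bool.not_eq_true] at hv
      rw [if_neg (by rw [hv]; simp), if_neg (by rw [hv]; simp),
        if_neg (by rw [hv]; simp), ih, Nat.add_zero]

theorem nodup_toggle (s : PySem.Set Char) (c : Char) (hs : s.Nodup) : (hppToggle s c).Nodup := by
  unfold hppToggle
  split
  · exact PySem.Set.nodup_discard s c hs
  · exact PySem.Set.nodup_add s c hs

theorem nodup_foldl_toggle (l : List Char) (s : PySem.Set Char) (hs : s.Nodup) :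
    (l.foldl hppToggle s).Nodup := by
  induction l generalizing s with
  | nil => exact hs
  | cons x l ih => exact ih _ (nodup_toggle s x hs)

theorem mem_toggle (s : PySem.Set Char) (c x : Char) :
    x ∈ hppToggle s c ↔ (if x = c then c ∉ s else x ∈ s) := by
  unfold hppToggle
  by_cases hc : c ∈ s
  · rw [if_pos ((PySem.Set.contains_iff s c).mpr hc), PySem.Set.mem_discard]
    by_cases hxc : x = c <;> simp [hxc, hc]
  · have hcf : PySem.Set.contains s c = false := by
      rw [← Bool.not_eq_true, PySem.Set.contains_iff]; exact hc
    rw [if_neg (by simpa [hcf] using hc), PySem.Set.mem_add]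
    by_cases hxc : x = c <;> simp [hxc, hc]

-- each toggle step changes the size by exactly one
theorem length_toggle (s : PySem.Set Char) (c : Char) (hs : s.Nodup) :
    (hppToggle s c).length % 2 = (s.length + 1) % 2 := by
  unfold hppToggle
  by_cases hc : c ∈ s
  · rw [if_pos ((PySem.Set.contains_iff s c).mpr hc)]
    show (List.filter _ s).length % 2 = _
    have h1 : (List.filter (fun y => !y == c) s).length
        + (List.filter (fun y => y == c) s).length = s.length := by
      rw [Nat.add_comm, ← List.length_eq_length_filter_add (fun y => y == c)]
    have h2 : (List.filter (fun y => y == c) s).length = 1 := by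
      rw [← List.countP_eq_length_filter]
      simpa [List.count] using List.count_eq_one_of_mem hs hc
    omega
  · have hcf : PySem.Set.contains s c = false := by
      rw [← Bool.not_eq_true, PySem.Set.contains_iff]; exact hc
    rw [if_neg (by simpa [hcf] using hc), PySem.Set.add_of_not_mem hc, List.length_append]
    simp

theorem length_foldl_toggle_parity (l : List Char) (s : PySem.Set Char) (hs : s.Nodup) :
    (l.foldl hppToggle s).length % 2 = (s.length + l.length) % 2 := by
  induction l generalizing s with
  | nil => simp
  | cons c l ih =>
    rw [List.foldl_cons, ih _ (nodup_toggle s c hs), List.length_cons]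
    have := length_toggle s c hs
    omega

theorem mem_foldl_toggle (l : List Char) (s : PySem.Set Char) (x : Char) :
    x ∈ l.foldl hppToggle s ↔ ((x ∈ s) ↔ l.count x % 2 = 0) := by
  induction l generalizing s with
  | nil => simp
  | cons y l ih =>
    rw [List.foldl_cons, ih, mem_toggle s y x, List.count_cons]
    by_cases hxy : x = y
    · subst hxy
      simp only [beq_self_eq_true, if_pos]
      by_cases hxs : x ∈ s <;> simp [hxs] <;> omega
    · have hb : (y == x) = false := by simp [Ne.symm hxy]
      simp [if_neg hxy, hb]

-- the toggle-set's size is A's number of odd-count distinct characters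
theorem len_foldl_toggle (l : List Char) :
    (l.foldl hppToggle PySem.Set.empty).length
      = (PySem.Set.ofList l).countP (fun k => l.count k % 2 = 1) := by
  rw [List.countP_eq_length_filter]
  apply List.Perm.length_eq
  have h1 : (l.foldl hppToggle PySem.Set.empty).Nodup :=
    nodup_foldl_toggle l PySem.Set.empty List.nodup_nil
  have h2 : ((PySem.Set.ofList l).filter (fun k => decide (l.count k % 2 = 1))).Nodup :=
    (PySem.Set.nodup_ofList l).filter _
  rw [List.perm_ext_iff_of_nodup h1 h2]
  intro x
  rw [mem_foldl_toggle l PySem.Set.empty x, List.mem_filter]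
  simp only [PySem.Set.mem_ofList, decide_eq_true_eq]
  constructor
  · intro h
    have h0 : ¬ (x ∈ (PySem.Set.empty : PySem.Set Char)) := List.not_mem_nil
    have h1 : l.count x % 2 = 1 := by
      rcases Nat.mod_two_eq_zero_or_one (l.count x) with h' | h'
      · exact absurd (h.mpr h') h0
      · exact h'
    exact ⟨List.count_pos_iff.mp (by omega), h1⟩
  · intro ⟨_, h⟩
    constructor
    · intro hx; exact absurd hx List.not_mem_nil
    · intro h0; omega

-- ===== VERDICT (by name: the statement is the Claim_ definition above) =====
theorem has_palindromic_permutation_spec : Claim_equal_has_palindromic_permutation := by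
  intro text _
  unfold Spec_has_palindromic_permutation has_palindromic_permutation has_palindromic_permutation_alt
  simp only []
  set l : List Char := (PySem.Str.replace text " " "").toList with hl
  -- A's side: loop over the counter's values
  rw [hppLoop_eq]
  have hvals : (PySem.Dict.counter l).values
      = (PySem.Set.ofList l).map (fun k => ((l.count k : Int))) := by
    show ((PySem.Dict.counter l).items.map (fun x => x.2)) = _
    rw [PySem.Dict.items_counter, List.map_map]
    rfl
  rw [hvals, List.countP_map]
  have hcount : (PySem.Set.ofList l).countP
        ((fun v => PySem.Int.mod v 2 != 0) ∘ (fun k => ((l.count k : Int))))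
      = (PySem.Set.ofList l).countP (fun k => l.count k % 2 = 1) := by
    apply List.countP_congr
    intro x _
    simp only [Function.comp_apply, fmod_two_bne, decide_eq_true_eq]
  rw [hcount, ← len_foldl_toggle l]
  -- B's side and the final parity argument
  have hpar := length_foldl_toggle_parity l PySem.Set.empty List.nodup_nil
  rw [show (PySem.Set.empty : PySem.Set Char).length = 0 from rfl, Nat.zero_add] at hpar
  rw [PySem.Str.len_eq, ← hl, fmod_two_bne]
  show _ = decide ((((l.foldl hppToggle PySem.Set.empty).length : Nat) : Int) ≤ 1)
  generalize hN : (l.foldl hppToggle PySem.Set.empty).length = N at hpar ⊢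
  rw [decide_eq_decide]
  rcases Nat.mod_two_eq_zero_or_one l.length with h | h
  · rw [h] at hpar ⊢
    norm_num
    omega
  · rw [h] at hpar ⊢
    norm_num
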